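-- pv_equiv track=rewrite | github.com/noel88/crosspoint-reader-cjk | scripts/generate_cjk_ui_font.py | group_codepoints
-- ===== SOURCE A (Python) =====
-- def group_codepoints(codepoints):
--     """Group consecutive codepoints into intervals."""
--     if not codepoints:
--         return []
--
--     intervals = []
--     start = codepoints[0]
--     end = start
--
--     for cp in codepoints[1:]:
--         if cp == end + 1:
--             end = cp
--         else:
--             intervals.append((start, end))
--             start = cp
--             end = cp
--
--     intervals.append((start, end))
--     return intervals
-- ===== SOURCE B (Python) =====
-- from itertools import groupby
--
--
-- def group_codepoints(codepoints):
--     """Group consecutive codepoints into intervals."""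
--     intervals = []
--     for _, grp in groupby(enumerate(codepoints), key=lambda p: p[1] - p[0]):
--         cps = [cp for _, cp in grp]
--         intervals.append((cps[0], cps[-1]))
--     return intervals
-- ===== Notes on version B (the rewrite author's own statement) =====
-- stated objective: idiomatic
-- what changed: Replaces A's explicit start/end state machine with the value-minus-index groupby idiom: consecutive runs share the key cp - i, so each itertools.groupby group maps directly to (first, last).
import Mathlib
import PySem

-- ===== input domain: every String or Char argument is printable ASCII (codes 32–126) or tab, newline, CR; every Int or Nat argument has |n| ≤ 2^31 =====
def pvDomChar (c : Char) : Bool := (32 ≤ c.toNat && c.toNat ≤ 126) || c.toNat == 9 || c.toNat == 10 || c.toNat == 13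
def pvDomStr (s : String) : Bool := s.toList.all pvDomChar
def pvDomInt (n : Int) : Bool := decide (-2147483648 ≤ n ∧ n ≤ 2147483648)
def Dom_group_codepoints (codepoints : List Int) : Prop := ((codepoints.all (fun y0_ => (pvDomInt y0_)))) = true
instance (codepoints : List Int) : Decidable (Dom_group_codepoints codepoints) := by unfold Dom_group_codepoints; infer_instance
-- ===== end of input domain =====

-- B replaces A's explicit start/end state machine with the enumerate + groupby-on-(cp - i) idiom (same O(n) cost).

-- ===== PORT A =====
def group_codepoints (codepoints : List Int) : List (Int × Int) :=
  match codepoints with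
  | [] => []
  | c :: rest =>
    -- start = codepoints[0]; end = start; for cp in codepoints[1:]: …
    let r := rest.foldl (fun (st : List (Int × Int) × Int × Int) cp =>
      if cp = st.2.2 + 1 then (st.1, st.2.1, cp)
      else (st.1 ++ [(st.2.1, st.2.2)], cp, cp)) ([], c, c)
    r.1 ++ [(r.2.1, r.2.2)]

-- ===== PORT B =====
-- hand port of Python's enumerate (indices as Int; exact for lists)
def pvEnum (i : Int) : List Int → List (Int × Int)
  | [] => []
  | c :: r => (i, c) :: pvEnum (i + 1) r

-- hand port of itertools.groupby with key p.2 - p.1: consecutive elements with the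
-- group head's key stay in the group (exact: groupby yields maximal runs of equal key)
def pvGb (l : List (Int × Int)) : List (List (Int × Int)) :=
  match l with
  | [] => []
  | p :: rest =>
    (p :: rest.takeWhile (fun q => q.2 - q.1 == p.2 - p.1)) ::
      pvGb (rest.dropWhile (fun q => q.2 - q.1 == p.2 - p.1))
termination_by l.length
decreasing_by
  have := List.length_dropWhile_le (fun q : Int × Int => q.2 - q.1 == p.2 - p.1) rest
  simp; omega

def group_codepoints_alt (codepoints : List Int) : List (Int × Int) :=
  (pvGb (pvEnum 0 codepoints)).map (fun g =>
    let cps := g.map Prod.snd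
    -- cps[0] and cps[-1]; every group produced by pvGb is nonempty, so the defaults are never used
    (cps.headD 0, cps.getLastD 0))

-- ===== PRECONDITION & SPEC =====
def Spec_group_codepoints (codepoints : List Int) (out : List (Int × Int)) : Prop := out = group_codepoints_alt codepoints
instance (codepoints : List Int) (out : List (Int × Int)) : Decidable (Spec_group_codepoints codepoints out) := by unfold Spec_group_codepoints; infer_instance

-- ===== CLAIM (what is proved, stated in full; the proofs are below) =====
def Claim_equal_group_codepoints : Prop := ∀ (codepoints : List Int), Dom_group_codepoints codepoints → Spec_group_codepoints codepoints (group_codepoints codepoints)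

-- ===== LEMMAS AND PROOFS =====

-- reference recursion: A's state machine written as a recursive function
def pvSpec (s e : Int) : List Int → List (Int × Int)
  | [] => [(s, e)]
  | cp :: rest => if cp = e + 1 then pvSpec s cp rest else (s, e) :: pvSpec cp cp rest

theorem pvFold_eq_spec (rest : List Int) : ∀ (acc : List (Int × Int)) (s e : Int),
    (let r := rest.foldl (fun (st : List (Int × Int) × Int × Int) cp =>
      if cp = st.2.2 + 1 then (st.1, st.2.1, cp)
      else (st.1 ++ [(st.2.1, st.2.2)], cp, cp)) (acc, s, e)
     r.1 ++ [(r.2.1, r.2.2)]) = acc ++ pvSpec s e rest := by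
  induction rest with
  | nil => intro acc s e; simp [pvSpec]
  | cons cp rest ih =>
    intro acc s e
    simp only [List.foldl_cons, pvSpec]
    by_cases h : cp = e + 1
    · simp [h, ih]
    · simp [h, ih]

theorem map_snd_pvEnum (l : List Int) : ∀ j, (pvEnum j l).map Prod.snd = l := by
  induction l with
  | nil => intro j; simp [pvEnum]
  | cons c r ih => intro j; simp [pvEnum, ih]

-- dropWhile on an enumeration is the enumeration of a dropped suffix
theorem pvEnum_dropWhile (l : List Int) : ∀ (j k : Int),
    (pvEnum j l).dropWhile (fun q => q.2 - q.1 == k)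
      = pvEnum (j + ((pvEnum j l).takeWhile (fun q => q.2 - q.1 == k)).length)
              (l.drop ((pvEnum j l).takeWhile (fun q => q.2 - q.1 == k)).length) := by
  induction l with
  | nil => intro j k; simp [pvEnum]
  | cons c r ih =>
    intro j k
    simp only [pvEnum, List.dropWhile_cons, List.takeWhile_cons]
    by_cases h : c - j = k
    · simp only [h, beq_self_eq_true, if_true, List.length_cons]
      rw [ih (j + 1) k]
      congr 1
      push_cast; ring
    · have : ((c - j == k) = false) := by simpa using h
      simp [this, pvEnum]

-- the last element of a nonempty in-progress group carries value k + (index)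
theorem getLastD_takeWhile (l : List Int) : ∀ (j k : Int) (p : Int × Int), p.2 = k + j - 1 →
    ((p :: (pvEnum j l).takeWhile (fun q => q.2 - q.1 == k)).getLastD (0, 0)).2
      = k + j - 1 + ((pvEnum j l).takeWhile (fun q => q.2 - q.1 == k)).length := by
  induction l with
  | nil => intro j k p hp; simp [pvEnum, hp]
  | cons c r ih =>
    intro j k p hp
    simp only [pvEnum, List.takeWhile_cons]
    by_cases h : c - j = k
    · simp only [h, beq_self_eq_true, if_true]
      have h2 : (j, c).2 = k + (j + 1) - 1 := by simp; omega
      have := ih (j + 1) k (j, c) h2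
      simp only [List.getLastD_cons] at this ⊢
      rw [this]
      simp only [List.length_cons]
      push_cast; ring
    · have hb : ((c - j == k) = false) := by simpa using h
      simp [hb, hp]

def pvSpecTail : List (Int × Int) → List (Int × Int)
  | [] => []
  | (_, cp) :: tl => pvSpec cp cp (tl.map Prod.snd)

-- the state machine splits off exactly the maximal equal-key run
theorem pvSpec_takeWhile (l : List Int) : ∀ (j k s : Int),
    pvSpec s (k + j - 1) l
      = (s, k + j - 1 + ((pvEnum j l).takeWhile (fun q => q.2 - q.1 == k)).length)
          :: pvSpecTail ((pvEnum j l).dropWhile (fun q => q.2 - q.1 == k)) := by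
  induction l with
  | nil => intro j k s; simp [pvEnum, pvSpec, pvSpecTail]
  | cons c r ih =>
    intro j k s
    simp only [pvEnum, List.takeWhile_cons, List.dropWhile_cons, pvSpec]
    by_cases h : c - j = k
    · have hb : ((c - j == k) = true) := by simpa using h
      have hc : c = k + j - 1 + 1 := by omega
      rw [if_pos hb, if_pos hb, if_pos hc, hc]
      have := ih (j + 1) k s
      have harg : k + (j + 1) - 1 = k + j - 1 + 1 := by ring
      rw [harg] at this
      rw [this]
      simp only [List.length_cons]
      congr 2
      push_cast; ring
    · have hc : ¬ c = k + j - 1 + 1 := by omega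
      have hb : ¬ ((c - j == k) = true) := by simp; omega
      rw [if_neg hb, if_neg hb, if_neg hc]
      simp [pvSpecTail, map_snd_pvEnum]

-- helper: last value of a nonempty pair list via map snd
theorem mapsnd_getLastD (p : Int × Int) (t : List (Int × Int)) :
    ((p :: t).map Prod.snd).getLastD 0 = ((p :: t).getLastD (0, 0)).2 := by
  induction t generalizing p with
  | nil => simp
  | cons q t ih => simpa using ih q

-- main lemma: B's groupby pipeline equals the state-machine recursion
theorem pvGb_eq_spec : ∀ (n : Nat) (l : List Int), l.length ≤ n → ∀ (i s : Int),
    ((pvGb ((i, s) :: pvEnum (i + 1) l)).map (fun g =>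
      ((g.map Prod.snd).headD 0, (g.map Prod.snd).getLastD 0))) = pvSpec s s l := by
  intro n
  induction n with
  | zero =>
    intro l hl i s
    cases l with
    | cons a t => simp at hl
    | nil => simp [pvEnum, pvGb, pvSpec]
  | succ n ih =>
    intro l hl i s
    rw [pvGb]
    set k := s - i with hk
    have hkey : (s - i : Int) = k := rfl
    set tw := (pvEnum (i + 1) l).takeWhile (fun q => q.2 - q.1 == k) with htw
    set dw := (pvEnum (i + 1) l).dropWhile (fun q => q.2 - q.1 == k) with hdw
    have hlast : (((i, s) :: tw).getLastD (0, 0)).2 = s + tw.length := by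
      have := getLastD_takeWhile l (i + 1) k (i, s) (by simp [hk]; ring)
      rw [← htw] at this
      rw [this]; ring
    have hspec : pvSpec s s l = (s, s + tw.length) :: pvSpecTail dw := by
      have := pvSpec_takeWhile l (i + 1) k s
      have he : k + (i + 1) - 1 = s := by omega
      rw [he, ← htw, ← hdw] at this
      rw [this]
    have hdrop : dw = pvEnum (i + 1 + tw.length) (l.drop tw.length) := by
      rw [hdw, htw, pvEnum_dropWhile l (i + 1) k]
    have htail : ((pvGb dw).map (fun g =>
        ((g.map Prod.snd).headD 0, (g.map Prod.snd).getLastD 0))) = pvSpecTail dw := by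
      rw [hdrop]
      cases hd : l.drop tw.length with
      | nil => simp [pvEnum, pvGb, pvSpecTail]
      | cons cp r2 =>
        have hlen : r2.length ≤ n := by
          have h1 : (l.drop tw.length).length = l.length - tw.length := by simp
          have h2 : tw.length ≤ l.length := by
            have := (List.takeWhile_prefix (l := pvEnum (i + 1) l) (fun q : Int × Int => q.2 - q.1 == k)).length_le
            have hel : (pvEnum (i + 1) l).length = l.length := by
              have := congrArg List.length (map_snd_pvEnum l (i + 1))
              simpa using this
            rw [htw]; omega
          rw [hd] at h1
          simp at h1
          omega
        simp only [pvEnum]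
        have := ih r2 hlen (i + 1 + tw.length) cp
        have harg : (i + 1 + (tw.length : Int)) + 1 = i + 1 + tw.length + 1 := by ring
        rw [this]
        simp [pvSpecTail, map_snd_pvEnum]
    rw [hspec]
    simp only [List.map_cons, htail]
    congr 1
    have hm := mapsnd_getLastD (i, s) tw
    simp only [List.map_cons] at hm
    rw [hm, hlast]
    simp

-- ===== VERDICT (by name: the statement is the Claim_ definition above) =====
theorem group_codepoints_spec : Claim_equal_group_codepoints := by
  intro codepoints _
  unfold Spec_group_codepoints group_codepoints group_codepoints_alt
  cases codepoints with
  | nil => simp [pvEnum, pvGb]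
  | cons c rest =>
    simp only [pvEnum]
    rw [pvGb_eq_spec rest.length rest le_rfl 0 c]
    have := pvFold_eq_spec rest [] c c
    simpa using this
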